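-- pv_equiv track=rewrite | github.com/2739673455/address-alignment | address_alignment.py | address_extract
-- ===== SOURCE A (Python) =====
-- def address_extract(text: str, tagging: list[str]) -> dict[int, str]:
--     """地址提取"""
--     tagging = [i[2:] for i in tagging]
--     # 各级别对应地址信息
--     address = {
--         "prov": None,
--         "city": None,
--         "district": None,
--         "town": None,
--         "detail": None,
--         "name": None,
--         "phone": None,
--     }
--     # 提取出各级别地址信息
--     start_pos = 0
--     tag_len = len(tagging)
--     for end_pos in range(tag_len):
--         # 如果到结尾、或 end_pos 的下一个位置不是同一类
--         if (end_pos == tag_len - 1) or (tagging[end_pos + 1] != tagging[start_pos]):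
--             if tagging[start_pos] != "":
--                 address[tagging[start_pos]] = text[start_pos : end_pos + 1]
--             start_pos = end_pos + 1
--     return address
-- ===== SOURCE B (Python) =====
-- def _runs(tags):
--     """Run-length encode: consecutive equal tags -> (tag, length) pairs."""
--     runs = []
--     i = 0
--     n = len(tags)
--     while i < n:
--         j = i + 1
--         while j < n and tags[j] == tags[i]:
--             j += 1
--         runs.append((tags[i], j - i))
--         i = j
--     return runs
--
--
-- def address_extract(text: str, tagging: list[str]) -> dict[int, str]:
--     """地址提取 — two phases: run-length encode the stripped tags, then assign slices."""
--     address = {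
--         "prov": None,
--         "city": None,
--         "district": None,
--         "town": None,
--         "detail": None,
--         "name": None,
--         "phone": None,
--     }
--     pos = 0
--     for tag, length in _runs([i[2:] for i in tagging]):
--         if tag:
--             address[tag] = text[pos : pos + length]
--         pos += length
--     return address
-- ===== Notes on version B (the rewrite author's own statement) =====
-- stated objective: alternative
-- what changed: Replaces A's single index loop with next-element boundary tests by a two-phase decomposition: a run-length encoding of the stripped tag sequence first, then one pass over the (tag, length) runs assigning text slices at a running offset.
import Mathlib
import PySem

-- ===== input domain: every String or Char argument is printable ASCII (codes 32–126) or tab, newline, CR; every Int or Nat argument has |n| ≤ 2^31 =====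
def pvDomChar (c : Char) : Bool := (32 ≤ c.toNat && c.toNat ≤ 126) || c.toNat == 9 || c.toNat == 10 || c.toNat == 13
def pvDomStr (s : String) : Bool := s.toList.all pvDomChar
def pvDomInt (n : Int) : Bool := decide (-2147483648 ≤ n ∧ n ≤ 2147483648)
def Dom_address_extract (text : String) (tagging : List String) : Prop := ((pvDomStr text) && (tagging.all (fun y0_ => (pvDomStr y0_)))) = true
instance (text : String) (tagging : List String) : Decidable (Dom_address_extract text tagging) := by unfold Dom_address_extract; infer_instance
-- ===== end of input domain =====

-- B replaces A's single index loop with boundary tests by a two-phase decomposition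
-- (run-length encode the stripped tags, then assign text slices per run); same cost, alternative structure.

-- ===== PORT A =====
-- the initial address dict shared by both ports (both Pythons build the same literal)
def pvAddr0 : PySem.Dict String (Option String) :=
  PySem.Dict.ofList [("prov", none), ("city", none), ("district", none), ("town", none),
                     ("detail", none), ("name", none), ("phone", none)]

-- A's loop body: state = (address, start_pos), index = end_pos
def pvStepA (text : String) (tagging1 : List String) (tag_len : Int)
    (st : PySem.Dict String (Option String) × Int) (end_pos : Int) :
    PySem.Dict String (Option String) × Int :=
  if end_pos == tag_len - 1 || PySem.List.pyGetD tagging1 (end_pos + 1) "" != PySem.List.pyGetD tagging1 st.2 "" then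
    ((if PySem.List.pyGetD tagging1 st.2 "" != "" then
        st.1.insert (PySem.List.pyGetD tagging1 st.2 "")
          (some (PySem.Str.slice text (some st.2) (some (end_pos + 1))))
      else st.1), end_pos + 1)
  else st

def address_extract (text : String) (tagging : List String) : List (String × Option String) :=
  let tagging1 := tagging.map (fun i => PySem.Str.slice i (some 2) none)
  let tag_len : Int := tagging1.length
  ((PySem.List.pyRange 0 tag_len 1).foldl (pvStepA text tagging1 tag_len) (pvAddr0, 0)).1.items

-- ===== PORT B =====
-- _runs: the hand-written while-count of leading equal elements is List.takeWhile's length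
def pvRuns : List String → List (String × Nat)
  | [] => []
  | t :: rest =>
    let same := (rest.takeWhile (fun x => x == t)).length + 1
    (t, same) :: pvRuns (rest.drop (same - 1))
termination_by l => l.length
decreasing_by simp

-- B's assignment loop over the (tag, length) runs with the running offset pos
def pvAssign (text : String) : List (String × Nat) → PySem.Dict String (Option String) → Int → PySem.Dict String (Option String)
  | [], d, _ => d
  | (t, k) :: rs, d, pos =>
      pvAssign text rs
        (if t != "" then d.insert t (some (PySem.Str.slice text (some pos) (some (pos + (k : Int))))) else d)
        (pos + (k : Int))

def address_extract_alt (text : String) (tagging : List String) : List (String × Option String) :=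
  (pvAssign text (pvRuns (tagging.map (fun i => PySem.Str.slice i (some 2) none))) pvAddr0 0).items

-- ===== PRECONDITION & SPEC =====
def Spec_address_extract (text : String) (tagging : List String) (out : List (String × Option String)) : Prop := out = address_extract_alt text tagging
instance (text : String) (tagging : List String) (out : List (String × Option String)) : Decidable (Spec_address_extract text tagging out) := by unfold Spec_address_extract; infer_instance

-- ===== CLAIM (what is proved, stated in full; the proofs are below) =====
def Claim_equal_address_extract : Prop := ∀ (text : String) (tagging : List String), Dom_address_extract text tagging → Spec_address_extract text tagging (address_extract text tagging)

-- ===== LEMMAS AND PROOFS =====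

-- the element right after the takeWhile prefix fails the predicate
lemma pv_after_takeWhile (l : List String) (p : String → Bool)
    (h : (l.takeWhile p).length < l.length) : p (l[(l.takeWhile p).length]) = false := by
  have hlen : (l.takeWhile p).length + (l.dropWhile p).length = l.length := by
    rw [← List.length_append, List.takeWhile_append_dropWhile]
  have hsplit : l = l.takeWhile p ++ l.dropWhile p := (List.takeWhile_append_dropWhile (p := p) (l := l)).symm
  have e : l[(l.takeWhile p).length] = (l.dropWhile p)[0]'(by omega) := by
    rw [List.getElem_of_eq hsplit, List.getElem_append_right (le_refl _)]
    simp
  rw [e]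
  have := List.dropWhile_get_zero_not p l (by omega)
  simpa using this

-- inside a run (strictly before its last index) A's step leaves the state unchanged
lemma pv_step_skip (text : String) (ts : List String) (d : PySem.Dict String (Option String))
    (p j : Nat) (hlt : p + j + 1 < ts.length)
    (heq : ts[p + j + 1]'hlt = ts[p]'(by omega)) :
    pvStepA text ts (ts.length : Int) (d, (p : Int)) ((p : Int) + (j : Int)) = (d, (p : Int)) := by
  have h1 : (((p : Int) + (j : Int)) == ((ts.length : Int) - 1)) = false := by
    simp only [beq_eq_false_iff_ne, ne_eq]
    intro hE; omega
  have hcast : ((p : Int) + (j : Int) + 1) = ((p + j + 1 : Nat) : Int) := by push_cast; ring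
  have h2 : (PySem.List.pyGetD ts ((p : Int) + (j : Int) + 1) "" != PySem.List.pyGetD ts (p : Int) "") = false := by
    rw [hcast, PySem.List.pyGetD_natCast, PySem.List.pyGetD_natCast,
        List.getD_eq_getElem ts "" hlt, List.getD_eq_getElem ts "" (by omega), heq]
    simp
  simp only [pvStepA]
  rw [h1, h2]
  simp

-- A's step is the identity on every index of [p, p+c) when the next element still equals ts[p]
lemma pv_run_interior (text : String) (ts : List String) (d : PySem.Dict String (Option String))
    (p : Nat) :
    ∀ c : Nat, (∀ j, j < c → ∃ h : p + j + 1 < ts.length, ts[p + j + 1]'h = ts[p]'(by omega)) →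
    (PySem.List.pyRange (p : Int) ((p + c : Nat) : Int) 1).foldl (pvStepA text ts (ts.length : Int)) (d, (p : Int))
      = (d, (p : Int)) := by
  intro c
  induction c with
  | zero => intro _; rw [PySem.List.pyRange_one_eq_nil (by omega)]; rfl
  | succ c ih =>
    intro hrun
    rw [show ((p + (c+1) : Nat) : Int) = ((p + c : Nat) : Int) + 1 by omega,
        PySem.List.pyRange_one_succ_right (by omega), List.foldl_append,
        ih (fun j hj => hrun j (by omega))]
    simp only [List.foldl_cons, List.foldl_nil]
    obtain ⟨hb, he⟩ := hrun c (by omega)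
    rw [show ((p + c : Nat) : Int) = (p : Int) + (c : Int) by omega]
    exact pv_step_skip text ts d p c hb he

-- one full run: A's fold over [p, p+k) performs exactly B's per-run assignment and jumps to p+k
lemma pv_run (text : String) (ts : List String) (d : PySem.Dict String (Option String))
    (p k : Nat) (hp : p < ts.length) (head : String) (hhead : ts[p]'hp = head)
    (hk : k = ((ts.drop (p+1)).takeWhile (fun x => x == head)).length + 1) :
    (PySem.List.pyRange (p : Int) ((p + k : Nat) : Int) 1).foldl (pvStepA text ts (ts.length : Int)) (d, (p : Int))
      = ((if head != "" then
            d.insert head (some (PySem.Str.slice text (some (p : Int)) (some ((p : Int) + (k : Int)))))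
          else d), ((p + k : Nat) : Int)) := by
  have hrl : (ts.drop (p+1)).length = ts.length - (p+1) := by simp
  have htw : (((ts.drop (p+1)).takeWhile (fun x => x == head))).length ≤ (ts.drop (p+1)).length :=
    List.IsPrefix.length_le (List.takeWhile_prefix _)
  have hkle : p + k ≤ ts.length := by omega
  -- every element of the run except the boundary equals head
  have hint : ∀ j, j < k - 1 → ∃ h : p + j + 1 < ts.length, ts[p + j + 1]'h = ts[p]'(by omega) := by
    intro j hj
    have hb : p + j + 1 < ts.length := by omega
    refine ⟨hb, ?_⟩
    have h1 : ((ts.drop (p+1)).takeWhile (fun x => x == head))[j]'(by omega) = (ts.drop (p+1))[j]'(by omega) :=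
      List.IsPrefix.getElem (List.takeWhile_prefix _) (by omega)
    have h2 : (ts.drop (p+1))[j]'(by omega) = ts[p + j + 1]'hb := by
      rw [List.getElem_drop]; congr 1; omega
    have h3 := List.mem_takeWhile_imp (List.getElem_mem (l := (ts.drop (p+1)).takeWhile (fun x => x == head)) (by omega : j < _))
    rw [h1, h2] at h3
    simp only [beq_iff_eq] at h3
    rw [h3, hhead]
  rw [show ((p + k : Nat) : Int) = ((p + (k-1) : Nat) : Int) + 1 by omega,
      PySem.List.pyRange_one_succ_right (by omega), List.foldl_append,
      pv_run_interior text ts d p (k-1) hint]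
  simp only [List.foldl_cons, List.foldl_nil]
  -- the boundary step fires
  have hgetp : PySem.List.pyGetD ts (p : Int) "" = head := by
    rw [PySem.List.pyGetD_natCast, List.getD_eq_getElem ts "" hp, hhead]
  have hcond : ((((p + (k-1) : Nat) : Int)) == (ts.length : Int) - 1
      || PySem.List.pyGetD ts (((p + (k-1) : Nat) : Int) + 1) "" != PySem.List.pyGetD ts (p : Int) "") = true := by
    rcases Nat.lt_or_ge (p + k) ts.length with hlt | hge
    · -- the next element breaks the run
      have hb2 : k - 1 < (ts.drop (p+1)).length := by omega
      have hne : ((ts.drop (p+1))[k-1]'hb2 == head) = false := by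
        have := pv_after_takeWhile (ts.drop (p+1)) (fun x => x == head) (by omega)
        simpa [hk] using this
      have hidx : (((p + (k-1) : Nat) : Int) + 1) = ((p + k : Nat) : Int) := by omega
      have hgetn : PySem.List.pyGetD ts (((p + (k-1) : Nat) : Int) + 1) "" = (ts.drop (p+1))[k-1]'hb2 := by
        rw [hidx, PySem.List.pyGetD_natCast, List.getD_eq_getElem ts "" hlt, List.getElem_drop]
        congr 1; omega
      rw [hgetn, hgetp]
      simp only [Bool.or_eq_true, bne_iff_ne, ne_eq]
      right
      intro hEq
      rw [hEq] at hne
      simp at hne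
    · -- end of the tagging list
      have : ((p + (k-1) : Nat) : Int) = (ts.length : Int) - 1 := by omega
      rw [this]
      simp
  simp only [pvStepA]
  rw [hcond]
  simp only [if_true, hgetp]
  rw [show (((p + (k-1) : Nat) : Int) + 1) = (p : Int) + (k : Int) by omega]

-- main loop lemma: A's fold over indices [p, n) equals B's run processing of ts.drop p
lemma pv_main (text : String) (ts : List String) :
    ∀ (m p : Nat) (d : PySem.Dict String (Option String)), p + m = ts.length →
    (PySem.List.pyRange (p : Int) (ts.length : Int) 1).foldl (pvStepA text ts (ts.length : Int)) (d, (p : Int))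
      = (pvAssign text (pvRuns (ts.drop p)) d (p : Int), (ts.length : Int)) := by
  intro m
  induction m using Nat.strong_induction_on with
  | _ m IH =>
    intro p d hpm
    rcases Nat.eq_zero_or_pos m with hm | hm
    · have hp : p = ts.length := by omega
      subst hp
      rw [PySem.List.pyRange_one_eq_nil (by omega), List.drop_length]
      simp [pvRuns, pvAssign]
    · have hp : p < ts.length := by omega
      have hcons : ts.drop p = ts[p]'hp :: ts.drop (p+1) := List.drop_eq_getElem_cons hp
      have hrl : (ts.drop (p+1)).length = ts.length - (p+1) := by simp
      have htw : (((ts.drop (p+1)).takeWhile (fun x => x == ts[p]'hp))).length ≤ (ts.drop (p+1)).length :=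
        List.IsPrefix.length_le (List.takeWhile_prefix _)
      have hkk : p + ((((ts.drop (p+1)).takeWhile (fun x => x == ts[p]'hp))).length + 1) ≤ ts.length := by
        omega
      rw [hcons]
      rw [pvRuns]
      rw [pvAssign]
      rw [show (PySem.List.pyRange (p : Int) (ts.length : Int) 1)
            = PySem.List.pyRange (p : Int) ((p + (((ts.drop (p+1)).takeWhile (fun x => x == ts[p]'hp)).length + 1) : Nat) : Int) 1
              ++ PySem.List.pyRange ((p + (((ts.drop (p+1)).takeWhile (fun x => x == ts[p]'hp)).length + 1) : Nat) : Int) (ts.length : Int) 1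
          from PySem.List.pyRange_one_append _ _ _ (by omega) (by omega),
          List.foldl_append,
          pv_run text ts d p _ hp (ts[p]'hp) rfl rfl]
      rw [IH (m - (((ts.drop (p+1)).takeWhile (fun x => x == ts[p]'hp)).length + 1)) (by omega)
            (p + (((ts.drop (p+1)).takeWhile (fun x => x == ts[p]'hp)).length + 1)) _ (by omega)]
      rw [List.drop_drop]
      congr 2
      rw [show p + 1 + ((List.takeWhile (fun x => x == ts[p]'hp) (List.drop (p + 1) ts)).length + 1 - 1)
            = p + ((List.takeWhile (fun x => x == ts[p]'hp) (List.drop (p + 1) ts)).length + 1) from by omega]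

-- ===== VERDICT (by name: the statement is the Claim_ definition above) =====
theorem address_extract_spec : Claim_equal_address_extract := by
  intro text tagging _
  unfold Spec_address_extract address_extract address_extract_alt
  have h := pv_main text (tagging.map (fun i => PySem.Str.slice i (some 2) none))
    (tagging.map (fun i => PySem.Str.slice i (some 2) none)).length 0 pvAddr0 (by omega)
  simp only [Nat.cast_zero, List.drop_zero] at h
  exact congrArg (fun q => q.1.items) h
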